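-- pv_equiv track=rewrite | github.com/surrealgrain/webrefurb-landing | pipeline/production_sim.py | _logical_asset_names
-- ===== SOURCE A (Python) =====
-- def _logical_asset_names(paths: list[str]) -> list[str]:
--     result: list[str] = []
--     for value in paths:
--         name = str(value)
--         if "ticket_machine_guide" in name:
--             result.append("ticket_machine_guide")
--         elif "izakaya_food_drinks_menu" in name or "izakaya_food_menu" in name or "izakaya_drinks_menu" in name:
--             result.append("izakaya_food_drinks")
--         elif "ramen_food_menu" in name or "ramen_drinks_menu" in name:
--             result.append("ramen_food_menu")
--         elif name:
--             result.append(name)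
--     return sorted(set(result))
-- ===== SOURCE B (Python) =====
-- _TICKET = "ticket_machine_guide"
-- _IZAKAYA = ("izakaya_food_drinks_menu", "izakaya_food_menu", "izakaya_drinks_menu")
-- _RAMEN = ("ramen_food_menu", "ramen_drinks_menu")
--
--
-- def _is_ticket(n):
--     return _TICKET in n
--
--
-- def _is_izakaya(n):
--     return any(s in n for s in _IZAKAYA)
--
--
-- def _is_ramen(n):
--     return any(s in n for s in _RAMEN)
--
--
-- def _logical_asset_names(paths: list[str]) -> list[str]:
--     # Staged whole-list passes instead of a per-element elif chain:
--     # each fixed label is present iff some path reaches its precedence tier,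
--     # and the residual paths contribute themselves.
--     names = [str(v) for v in paths]
--     labels = set()
--     if any(_is_ticket(n) for n in names):
--         labels.add(_TICKET)
--     if any(_is_izakaya(n) and not _is_ticket(n) for n in names):
--         labels.add("izakaya_food_drinks")
--     if any(_is_ramen(n) and not _is_ticket(n) and not _is_izakaya(n) for n in names):
--         labels.add("ramen_food_menu")
--     labels |= {n for n in names
--                if n and not _is_ticket(n) and not _is_izakaya(n) and not _is_ramen(n)}
--     return sorted(labels)
-- ===== Notes on version B (the rewrite author's own statement) =====
-- stated objective: alternative
-- what changed: Replaces A's single pass with a per-element elif chain appending into a list (then set()+sorted) by staged whole-list passes: each fixed label is added iff any() path reaches its precedence tier, residual paths are collected by one set comprehension, and the set is sorted.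
import Mathlib
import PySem

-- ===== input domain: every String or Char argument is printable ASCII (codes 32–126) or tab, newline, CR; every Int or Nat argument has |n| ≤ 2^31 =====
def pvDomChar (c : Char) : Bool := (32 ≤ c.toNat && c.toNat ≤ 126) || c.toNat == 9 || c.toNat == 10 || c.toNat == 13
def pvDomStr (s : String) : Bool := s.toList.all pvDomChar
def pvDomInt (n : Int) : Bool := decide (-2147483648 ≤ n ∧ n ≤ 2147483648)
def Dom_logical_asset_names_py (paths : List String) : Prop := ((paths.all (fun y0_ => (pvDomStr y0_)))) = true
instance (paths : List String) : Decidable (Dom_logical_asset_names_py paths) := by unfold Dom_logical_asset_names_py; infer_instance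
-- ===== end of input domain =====

-- B replaces A's per-element elif chain (append into a list, then set()+sorted) by staged
-- whole-list passes: each fixed label is present iff any() path reaches its tier, residual
-- paths are collected by one set comprehension; same results, a different decomposition.

-- ===== PORT A =====
def logical_asset_names_py (paths : List String) : List String :=
  PySem.List.sorted (PySem.Set.ofList (paths.foldl (fun result value =>
    let name := value
    if PySem.Str.isIn "ticket_machine_guide" name then
      result ++ ["ticket_machine_guide"]
    else if PySem.Str.isIn "izakaya_food_drinks_menu" name || PySem.Str.isIn "izakaya_food_menu" name || PySem.Str.isIn "izakaya_drinks_menu" name then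
      result ++ ["izakaya_food_drinks"]
    else if PySem.Str.isIn "ramen_food_menu" name || PySem.Str.isIn "ramen_drinks_menu" name then
      result ++ ["ramen_food_menu"]
    else if name ≠ "" then
      result ++ [name]
    else result) [])) (fun x => x) false

-- ===== PORT B =====
def pvIsTicket (n : String) : Bool := PySem.Str.isIn "ticket_machine_guide" n
def pvIsIzakaya (n : String) : Bool :=
  PySem.Str.isIn "izakaya_food_drinks_menu" n || PySem.Str.isIn "izakaya_food_menu" n || PySem.Str.isIn "izakaya_drinks_menu" n
def pvIsRamen (n : String) : Bool :=
  PySem.Str.isIn "ramen_food_menu" n || PySem.Str.isIn "ramen_drinks_menu" n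

def logical_asset_names_py_alt (paths : List String) : List String :=
  let names := paths
  let labels0 : PySem.Set String := PySem.Set.empty
  let labels1 := if names.any (fun n => pvIsTicket n) then PySem.Set.add labels0 "ticket_machine_guide" else labels0
  let labels2 := if names.any (fun n => pvIsIzakaya n && !pvIsTicket n) then PySem.Set.add labels1 "izakaya_food_drinks" else labels1
  let labels3 := if names.any (fun n => pvIsRamen n && !pvIsTicket n && !pvIsIzakaya n) then PySem.Set.add labels2 "ramen_food_menu" else labels2
  let labels4 := PySem.Set.union labels3 (PySem.Set.ofList (names.filter (fun n => n ≠ "" && !pvIsTicket n && !pvIsIzakaya n && !pvIsRamen n)))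
  PySem.List.sorted labels4 (fun x => x) false

-- ===== PRECONDITION & SPEC =====
def Spec_logical_asset_names_py (paths : List String) (out : List String) : Prop := out = logical_asset_names_py_alt paths
instance (paths : List String) (out : List String) : Decidable (Spec_logical_asset_names_py paths out) := by unfold Spec_logical_asset_names_py; infer_instance

-- ===== CLAIM (what is proved, stated in full; the proofs are below) =====
def Claim_equal_logical_asset_names_py : Prop := ∀ (paths : List String), Dom_logical_asset_names_py paths → Spec_logical_asset_names_py paths (logical_asset_names_py paths)

-- ===== LEMMAS AND PROOFS =====

-- what A's elif chain appends for one path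
def pvLabelOf (n : String) : Option String :=
  if pvIsTicket n then some "ticket_machine_guide"
  else if pvIsIzakaya n then some "izakaya_food_drinks"
  else if pvIsRamen n then some "ramen_food_menu"
  else if n ≠ "" then some n
  else none

lemma pv_foldA_eq (l : List String) (r : List String) :
    l.foldl (fun result value =>
      let name := value
      if PySem.Str.isIn "ticket_machine_guide" name then
        result ++ ["ticket_machine_guide"]
      else if PySem.Str.isIn "izakaya_food_drinks_menu" name || PySem.Str.isIn "izakaya_food_menu" name || PySem.Str.isIn "izakaya_drinks_menu" name then
        result ++ ["izakaya_food_drinks"]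
      else if PySem.Str.isIn "ramen_food_menu" name || PySem.Str.isIn "ramen_drinks_menu" name then
        result ++ ["ramen_food_menu"]
      else if name ≠ "" then
        result ++ [name]
      else result) r
    = r ++ l.filterMap pvLabelOf := by
  induction l generalizing r with
  | nil => simp
  | cons v t ih =>
    simp only [List.foldl_cons, List.filterMap_cons]
    have hstep : ∀ (r' : List String),
        (let name := v
         if PySem.Str.isIn "ticket_machine_guide" name then
           r' ++ ["ticket_machine_guide"]
         else if PySem.Str.isIn "izakaya_food_drinks_menu" name || PySem.Str.isIn "izakaya_food_menu" name || PySem.Str.isIn "izakaya_drinks_menu" name then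
           r' ++ ["izakaya_food_drinks"]
         else if PySem.Str.isIn "ramen_food_menu" name || PySem.Str.isIn "ramen_drinks_menu" name then
           r' ++ ["ramen_food_menu"]
         else if name ≠ "" then
           r' ++ [name]
         else r') = r' ++ (pvLabelOf v).toList := by
      intro r'
      simp only [pvLabelOf, pvIsTicket, pvIsIzakaya, pvIsRamen]
      split_ifs <;> simp
    rw [hstep, ih]
    cases h : pvLabelOf v <;> simp

lemma pv_memA (paths : List String) (x : String) :
    x ∈ PySem.Set.ofList (paths.foldl (fun result value =>
      let name := value
      if PySem.Str.isIn "ticket_machine_guide" name then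
        result ++ ["ticket_machine_guide"]
      else if PySem.Str.isIn "izakaya_food_drinks_menu" name || PySem.Str.isIn "izakaya_food_menu" name || PySem.Str.isIn "izakaya_drinks_menu" name then
        result ++ ["izakaya_food_drinks"]
      else if PySem.Str.isIn "ramen_food_menu" name || PySem.Str.isIn "ramen_drinks_menu" name then
        result ++ ["ramen_food_menu"]
      else if name ≠ "" then
        result ++ [name]
      else result) [])
    ↔ ∃ v ∈ paths, pvLabelOf v = some x := by
  rw [pv_foldA_eq, PySem.Set.mem_ofList]
  simp [List.mem_filterMap]

-- B's set, named for the proofs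
def pvBSet (paths : List String) : PySem.Set String :=
  let labels0 : PySem.Set String := PySem.Set.empty
  let labels1 := if paths.any (fun n => pvIsTicket n) then PySem.Set.add labels0 "ticket_machine_guide" else labels0
  let labels2 := if paths.any (fun n => pvIsIzakaya n && !pvIsTicket n) then PySem.Set.add labels1 "izakaya_food_drinks" else labels1
  let labels3 := if paths.any (fun n => pvIsRamen n && !pvIsTicket n && !pvIsIzakaya n) then PySem.Set.add labels2 "ramen_food_menu" else labels2
  PySem.Set.union labels3 (PySem.Set.ofList (paths.filter (fun n => n ≠ "" && !pvIsTicket n && !pvIsIzakaya n && !pvIsRamen n)))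

lemma pv_alt_eq (paths : List String) :
    logical_asset_names_py_alt paths = PySem.List.sorted (pvBSet paths) (fun x => x) false := rfl

lemma pv_exists_label (paths : List String) (x : String) :
    (∃ v ∈ paths, pvLabelOf v = some x) ↔
      ((paths.any (fun n => pvIsTicket n)) = true ∧ x = "ticket_machine_guide") ∨
      ((paths.any (fun n => pvIsIzakaya n && !pvIsTicket n)) = true ∧ x = "izakaya_food_drinks") ∨
      ((paths.any (fun n => pvIsRamen n && !pvIsTicket n && !pvIsIzakaya n)) = true ∧ x = "ramen_food_menu") ∨
      (x ∈ paths ∧ (decide (x ≠ "") && !pvIsTicket x && !pvIsIzakaya x && !pvIsRamen x) = true) := by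
  simp only [List.any_eq_true, Bool.and_eq_true, Bool.not_eq_true', decide_eq_true_eq, ne_eq]
  constructor
  · rintro ⟨v, hv, hl⟩
    unfold pvLabelOf at hl
    split_ifs at hl with h1 h2 h3 h4 <;>
      simp only [Option.some.injEq] at hl
    · exact Or.inl ⟨⟨v, hv, h1⟩, hl.symm⟩
    · exact Or.inr (Or.inl ⟨⟨v, hv, h2, by simpa using h1⟩, hl.symm⟩)
    · exact Or.inr (Or.inr (Or.inl ⟨⟨v, hv, ⟨h3, by simpa using h1⟩, by simpa using h2⟩, hl.symm⟩))
    · subst hl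
      exact Or.inr (Or.inr (Or.inr ⟨hv, ⟨⟨h4, by simpa using h1⟩, by simpa using h2⟩, by simpa using h3⟩))
  · rintro (⟨⟨v, hv, hp⟩, rfl⟩ | ⟨⟨v, hv, hp, hq⟩, rfl⟩ | ⟨⟨v, hv, ⟨hp, hq⟩, hr⟩, rfl⟩ | ⟨hv, ⟨⟨hn, h1⟩, h2⟩, h3⟩)
    · exact ⟨v, hv, by simp [pvLabelOf, hp]⟩
    · exact ⟨v, hv, by simp [pvLabelOf, hp, hq]⟩
    · exact ⟨v, hv, by simp [pvLabelOf, hp, hq, hr]⟩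
    · exact ⟨x, hv, by simp [pvLabelOf, hn, h1, h2, h3]⟩

lemma pv_memB (paths : List String) (x : String) :
    x ∈ pvBSet paths ↔ (∃ v ∈ paths, pvLabelOf v = some x) := by
  rw [pv_exists_label]
  unfold pvBSet
  by_cases c1 : (paths.any (fun n => pvIsTicket n)) = true <;>
  by_cases c2 : (paths.any (fun n => pvIsIzakaya n && !pvIsTicket n)) = true <;>
  by_cases c3 : (paths.any (fun n => pvIsRamen n && !pvIsTicket n && !pvIsIzakaya n)) = true <;>
    simp only [c1, c2, c3, if_true, if_false, Bool.false_eq_true,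
      PySem.Set.mem_union, PySem.Set.mem_add, PySem.Set.mem_ofList, List.mem_filter,
      PySem.Set.empty, List.not_mem_nil, false_or] <;>
    tauto

lemma pv_nodupB (paths : List String) : (pvBSet paths : List String).Nodup := by
  unfold pvBSet
  apply PySem.Set.nodup_union
  split_ifs <;>
    repeat
      first
        | exact List.nodup_nil
        | apply PySem.Set.nodup_add

-- ===== VERDICT (by name: the statement is the Claim_ definition above) =====
theorem logical_asset_names_py_spec : Claim_equal_logical_asset_names_py := by
  intro paths _
  unfold Spec_logical_asset_names_py
  rw [pv_alt_eq]
  unfold logical_asset_names_py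
  apply PySem.List.sorted_eq_sorted_of_perm
  · exact fun a b h => h
  · refine (List.perm_ext_iff_of_nodup (PySem.Set.nodup_ofList _) (pv_nodupB paths)).mpr ?_
    intro x
    rw [pv_memA, pv_memB]
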